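-- pv_equiv track=rewrite | github.com/asarlija/bioinformatics-algorithms | BA1I.py | kmerswithapproxcount
-- ===== SOURCE A (Python) =====
-- def kmer(text, i, k):
--     """substring of text from i-th position for the next k letters"""
--     return text[i:(i+k)]
--
-- def HammingDistance(p, q):
--     """Computes the Hamming distance between strings p and q"""
--     if len(p) != len(q):
--         return -1
--     dist = 0
--     #zip(AB,CD) gives (('A','C'),('B','D'))
--     for first, second in zip(p, q):
--         if first != second:
--             dist = dist + 1
--     return dist
--
-- def ApproximatePatternCount(text,pattern,d):
--     """ returns number of occurrances pattern in text with at most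
--         d mismatches """
--     count=0
--     nt=len(text)
--     np=len(pattern)
--     for i in range (0,nt-np+1):
--         pattern2=kmer(text,i,np)
--         if (HammingDistance(pattern,pattern2)<=d):
--             count=count+1
--     return count
--
-- def suffix(pattern):
--     """ substring of pattern without first letter """
--     return pattern[1:]
--
-- def Neighbours(pattern,d):
--     """ returns set of pattern with at most d mismatches """
--     nucleotides={'A','C','G','T'}
--     if d==0:
--         return {pattern}
--     if len(pattern)==1:
--         return nucleotides
--     neighborhood=set()
--     suffixNeighbors=Neighbours(suffix(pattern),d)
--     for x in suffixNeighbors: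
--         if (HammingDistance(suffix(pattern),x)<d):
--             for n in nucleotides:
--                 neighborhood.add(n+x)
--         else:
--             neighborhood.add(pattern[0]+x)
--     return neighborhood
--
-- def Lwindows(text,L):
--     """list of all L-windows in text"""
--     windows=list()
--     for i in range (0,len(text)-L+1):
--         windows.append(kmer(text,i,L))
--     return windows
--
-- def kmerswithapproxcount(text,k,d):
--     """ for given text and integers k (for kmer) and d (for mismatches)
--         we return dictionary D
--         we slide a window of text length k,
--         then we look all Neighbours (pattern) - of what window with d mismatches,
--         and we will put a key pattern with value number of occurrances
--         that pattern in text with at most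
--         d mismatches
--     """
--
--     D=dict()
--     for window in Lwindows(text,k):
--         for pattern in Neighbours(window,d):
--             D[pattern]=ApproximatePatternCount(text,pattern,d)
--     return D
--     """
--         without function subset
--     """
-- ===== SOURCE B (Python) =====
-- NUCLEOTIDES = "ACGT"
--
--
-- def hamming(p, q):
--     """Hamming distance, -1 on unequal lengths (as in the original module)."""
--     if len(p) != len(q):
--         return -1
--     return sum(a != b for a, b in zip(p, q))
--
--
-- def neighborhood(pattern, d):
--     """The d-neighborhood of pattern, built iteratively: a frontier of
--     (candidate, mismatch-count) pairs is expanded over the pattern's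
--     suffixes from right to left, so no distance is ever recomputed."""
--     if d == 0:
--         return [pattern]
--     if not pattern:
--         return []
--     last = pattern[-1]
--     frontier = [(c, 0 if c == last else 1) for c in NUCLEOTIDES]
--     for c in reversed(pattern[:-1]):
--         nxt = {}
--         for x, e in frontier:
--             if e < d:
--                 for n in NUCLEOTIDES:
--                     if n + x not in nxt:
--                         nxt[n + x] = e + (0 if n == c else 1)
--             else:
--                 if c + x not in nxt:
--                     nxt[c + x] = e
--         frontier = list(nxt.items())
--     return [x for x, _ in frontier]
--
--
-- def kmerswithapproxcount(text, k, d):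
--     windows = [text[i:i + k] for i in range(len(text) - k + 1)]
--     wcount = {}
--     for w in windows:
--         wcount[w] = wcount.get(w, 0) + 1
--     # phase 1: collect the patterns (keys) in first-appearance order, all at 0
--     counts = {}
--     for w in windows:
--         for p in neighborhood(w, d):
--             if p not in counts:
--                 counts[p] = 0
--     patterns = list(counts)
--     # phase 2: one pass over the distinct windows, crediting each multiplicity
--     for w2, m in wcount.items():
--         for p in patterns:
--             if hamming(p, w2) <= d:
--                 counts[p] += m
--     return counts
-- ===== Notes on version B (the rewrite author's own statement) =====
-- stated objective: alternative
-- what changed: B replaces A's recursive set-building (with a fresh Hamming-distance call per candidate) by an iterative right-to-left frontier expansion that carries each candidate's mismatch count, and replaces A's per-neighbour rescan of the whole text by two staged passes: collect the pattern keys once, then a single sweep over the distinct-window multiplicity table credits every pattern's count.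
-- outside the precondition, e.g. on kmerswithapproxcount('AC', -1, 0): A returns {'A': 1, '': 3}, B returns {'A': 4, '': 4}
import Mathlib
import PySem

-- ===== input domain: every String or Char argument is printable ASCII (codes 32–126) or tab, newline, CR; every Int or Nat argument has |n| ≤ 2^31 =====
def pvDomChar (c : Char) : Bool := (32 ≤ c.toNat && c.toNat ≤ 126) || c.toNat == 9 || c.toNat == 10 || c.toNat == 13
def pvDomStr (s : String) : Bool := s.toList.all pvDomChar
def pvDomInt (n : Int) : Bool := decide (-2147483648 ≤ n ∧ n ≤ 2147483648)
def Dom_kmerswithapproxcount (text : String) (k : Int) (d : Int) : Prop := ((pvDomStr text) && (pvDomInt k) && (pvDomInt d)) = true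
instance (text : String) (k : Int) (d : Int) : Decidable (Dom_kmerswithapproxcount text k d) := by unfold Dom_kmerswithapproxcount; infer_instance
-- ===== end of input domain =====

-- B builds each window's neighborhood by an iterative right-to-left frontier expansion that
-- carries mismatch counts, and computes all counts in two staged passes over a distinct-window
-- multiplicity table, instead of A's recursive set-building and per-neighbour text rescans.

-- ===== PORT A =====   (ports work on List Char; keys are rebuilt as Strings at the end)

-- kmer(text, i, k) = text[i:(i+k)]
def kmerA (t : List Char) (i k : Int) : List Char := PySem.List.slice t (some i) (some (i + k))

-- HammingDistance(p, q)
def hamA (p q : List Char) : Int :=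
  if p.length ≠ q.length then -1
  else (p.zip q).foldl (fun dist pr => if pr.1 ≠ pr.2 then dist + 1 else dist) 0

-- ApproximatePatternCount(text, pattern, d)
def apcA (t pattern : List Char) (d : Int) : Int :=
  (PySem.List.pyRange 0 ((t.length : Int) - (pattern.length : Int) + 1) 1).foldl
    (fun count i => if hamA pattern (kmerA t i (pattern.length : Int)) ≤ d then count + 1 else count) 0

-- nucleotides = {'A','C','G','T'}  (a Python set of 1-character strings)
def nucsA : PySem.Set (List Char) := PySem.Set.ofList [['A'], ['C'], ['G'], ['T']]

-- Neighbours(pattern, d); suffix(pattern) = pattern[1:] is 'rest', pattern[0] is 'c' in the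
-- nonempty match arm; the [] arm is a totality guard (Python recurses forever there).
def NeighboursA (pattern : List Char) (d : Int) : PySem.Set (List Char) :=
  if d = 0 then PySem.Set.add PySem.Set.empty pattern
  else if pattern.length = 1 then nucsA
  else match pattern with
  | [] => PySem.Set.empty
  | c :: rest =>
    (NeighboursA rest d).foldl
      (fun nb x =>
        if hamA rest x < d then nucsA.foldl (fun nb n => PySem.Set.add nb (n ++ x)) nb
        else PySem.Set.add nb ([c] ++ x))
      PySem.Set.empty
termination_by pattern.length
decreasing_by simp

-- Lwindows(text, L)
def LwindowsA (t : List Char) (L : Int) : List (List Char) :=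
  (PySem.List.pyRange 0 ((t.length : Int) - L + 1) 1).foldl (fun ws i => ws ++ [kmerA t i L]) []

def kmerswithapproxcount (text : String) (k : Int) (d : Int) : List (String × Int) :=
  let t := text.toList
  (((LwindowsA t k).foldl
      (fun D w => (NeighboursA w d).foldl (fun D p => D.insert p (apcA t p d)) D)
      PySem.Dict.empty).items).map (fun pc => (String.ofList pc.1, pc.2))

-- ===== PORT B =====

-- NUCLEOTIDES = "ACGT"
def nucsB : List Char := ['A', 'C', 'G', 'T']

-- hamming(p, q)
def hamB (p q : List Char) : Int :=
  if p.length ≠ q.length then -1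
  else ((p.zip q).map (fun pr => if pr.1 ≠ pr.2 then (1 : Int) else 0)).sum

-- one frontier-expansion step of neighborhood(): the body of 'for c in reversed(pattern[:-1])';
-- nxt is the Python dict keyed by the extended candidate, holding its mismatch count
def extendLevel (d : Int) (c : Char) (frontier : List (List Char × Int)) : List (List Char × Int) :=
  (frontier.foldl
    (fun nxt xe =>
      if xe.2 < d then
        nucsB.foldl
          (fun nxt n =>
            if nxt.contains (n :: xe.1) then nxt
            else nxt.insert (n :: xe.1) (xe.2 + (if n = c then 0 else 1)))
          nxt
      else if nxt.contains (c :: xe.1) then nxt else nxt.insert (c :: xe.1) xe.2)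
    PySem.Dict.empty).items

-- neighborhood(pattern, d); 'if not pattern' + 'last = pattern[-1]' become one match on getLast?
def neighborhoodB (pattern : List Char) (d : Int) : List (List Char) :=
  if d = 0 then [pattern]
  else match pattern.getLast? with
  | none => []
  | some last =>
    (pattern.dropLast.reverse.foldl (fun f c => extendLevel d c f)
      (nucsB.map (fun c => ([c], if c = last then (0 : Int) else 1)))).map (fun xe => xe.1)

def kmerswithapproxcount_alt (text : String) (k : Int) (d : Int) : List (String × Int) :=
  let t := text.toList
  let windows := (PySem.List.pyRange 0 ((t.length : Int) - k + 1) 1).map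
    (fun i => PySem.List.slice t (some i) (some (i + k)))
  let wcount := windows.foldl (fun D w => D.insert w (D.getD w 0 + 1)) PySem.Dict.empty
  -- phase 1: collect the pattern keys in first-appearance order, all at 0
  let counts0 := windows.foldl
    (fun D w => (neighborhoodB w d).foldl
      (fun D p => if D.contains p then D else D.insert p 0) D)
    PySem.Dict.empty
  let patterns := counts0.keys
  -- phase 2: one pass over the distinct windows, crediting each multiplicity
  let counts := wcount.items.foldl
    (fun D wm => patterns.foldl
      (fun D p => if hamB p wm.1 ≤ d then D.insert p (D.getD p 0 + wm.2) else D) D)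
    counts0
  counts.items.map (fun pc => (String.ofList pc.1, pc.2))

-- ===== PRECONDITION & SPEC =====
-- Pre_ excludes k < 0 (there A counts occurrences of a neighbour by re-scanning the text while B
-- counts over its own window list, two accidental readings of negative window length; for d ≠ 0
-- Python A even recurses forever) and k = 0 with d ≠ 0, where Python A's neighbour recursion on
-- the empty window never terminates (RecursionError).
def Pre_kmerswithapproxcount (text : String) (k : Int) (d : Int) : Prop :=
  0 ≤ k ∧ (k = 0 → d = 0)
instance (text : String) (k : Int) (d : Int) : Decidable (Pre_kmerswithapproxcount text k d) := by
  unfold Pre_kmerswithapproxcount; infer_instance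

def pvWitness_kmerswithapproxcount : String × Int × Int := ("ACGT", 2, 1)

def Spec_kmerswithapproxcount (text : String) (k : Int) (d : Int) (out : List (String × Int)) : Prop :=
  out = kmerswithapproxcount_alt text k d
instance (text : String) (k : Int) (d : Int) (out : List (String × Int)) :
    Decidable (Spec_kmerswithapproxcount text k d out) := by
  unfold Spec_kmerswithapproxcount; infer_instance

-- ===== CLAIM (what is proved, stated in full; the proofs are below) =====
def Claim_equal_kmerswithapproxcount : Prop :=
  ∀ (text : String) (k : Int) (d : Int), Dom_kmerswithapproxcount text k d →
    Pre_kmerswithapproxcount text k d →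
    Spec_kmerswithapproxcount text k d (kmerswithapproxcount text k d)

-- ===== LEMMAS AND PROOFS =====

theorem ham_eq (p q : List Char) : hamA p q = hamB p q := by
  simp only [hamA, hamB]
  split
  · rfl
  · have h1 : (fun (dist:Int) (pr:Char×Char) => if pr.1 ≠ pr.2 then dist + 1 else dist)
        = (fun dist pr => if (decide (pr.1 ≠ pr.2)) = true then dist + 1 else dist) := by
      funext dist pr; simp
    have h2 : (fun (pr:Char×Char) => if pr.1 ≠ pr.2 then (1:Int) else 0)
        = (fun pr => if (decide (pr.1 ≠ pr.2)) = true then (1:Int) else 0) := by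
      funext pr; simp
    rw [h1, h2, PySem.List.foldl_count_if, PySem.List.sum_map_ite_one_zero]
    simp

-- A's nucleotide set, as the literal list
theorem nucsA_eq : nucsA = nucsB.map (fun c => [c]) := by decide

theorem hamA_single (c n : Char) : hamA [c] [n] = if n = c then 0 else 1 := by
  by_cases h : n = c <;> simp [hamA, h] <;> simp [Ne.symm h]

theorem hamB_cons (c n : Char) (rest x : List Char) (h : x.length = rest.length) :
    hamB (c :: rest) (n :: x) = (if n = c then 0 else 1) + hamB rest x := by
  by_cases hnc : n = c <;> simp [hamB, h, hnc] <;> simp [Ne.symm hnc]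

-- A's recursive step, flattened: the new level is set(ofList) of the extension sequence
theorem A_level (c : Char) (rest : List Char) (d : Int) (hd : d ≠ 0) (hr : rest ≠ []) :
    NeighboursA (c :: rest) d =
      PySem.Set.ofList ((NeighboursA rest d).flatMap
        (fun x => (if hamA rest x < d then nucsB else [c]).map (fun n => n :: x))) := by
  rw [NeighboursA, if_neg hd, if_neg (by simp [hr])]
  have hbody : ∀ (nb : PySem.Set (List Char)) (x : List Char),
      (if hamA rest x < d then nucsA.foldl (fun nb n => PySem.Set.add nb (n ++ x)) nb
       else PySem.Set.add nb ([c] ++ x))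
      = ((if hamA rest x < d then nucsB else [c]).map (fun n => n :: x)).foldl PySem.Set.add nb := by
    intro nb x
    split_ifs with hh
    · rw [← PySem.Set.update_map_eq_foldl_add, ← PySem.Set.update_map_eq_foldl_add]
      rfl
    · rfl
  calc (NeighboursA rest d).foldl
          (fun nb x =>
            if hamA rest x < d then nucsA.foldl (fun nb n => PySem.Set.add nb (n ++ x)) nb
            else PySem.Set.add nb ([c] ++ x)) PySem.Set.empty
      = (NeighboursA rest d).foldl
          (fun nb x => ((if hamA rest x < d then nucsB else [c]).map (fun n => n :: x)).foldl PySem.Set.add nb) PySem.Set.empty := by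
        exact PySem.List.foldl_congr_mem _ _ _ _ (fun nb x _ => hbody nb x)
    _ = ((NeighboursA rest d).flatMap (fun x => (if hamA rest x < d then nucsB else [c]).map (fun n => n :: x))).foldl PySem.Set.add [] := by
        rw [List.foldl_flatMap]; rfl
    _ = PySem.Set.ofList ((NeighboursA rest d).flatMap (fun x => (if hamA rest x < d then nucsB else [c]).map (fun n => n :: x))) := by
        rw [PySem.Set.ofList_eq_foldl]

theorem neighboursA_length (d : Int) : ∀ (p q : List Char), q ∈ NeighboursA p d → q.length = p.length := by
  intro p
  induction p with
  | nil =>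
    intro q hq
    rw [NeighboursA] at hq
    split_ifs at hq <;> simp_all [PySem.Set.add, PySem.Set.empty]
  | cons c rest ih =>
    intro q hq
    by_cases hd : d = 0
    · rw [NeighboursA, if_pos hd] at hq
      simp [PySem.Set.add, PySem.Set.empty] at hq; subst hq; rfl
    · by_cases hr : rest = []
      · subst hr
        rw [NeighboursA, if_neg hd, if_pos (by simp)] at hq
        rw [nucsA_eq] at hq
        simp [nucsB] at hq
        rcases hq with h | h | h | h <;> simp [h]
      · rw [A_level c rest d hd hr] at hq
        rw [PySem.Set.mem_ofList] at hq
        simp only [List.mem_flatMap, List.mem_map] at hq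
        obtain ⟨x, hx, n, hn, rfl⟩ := hq
        simp [ih x hx]

-- generic insert-if-absent fold over a list of (key, value) pairs: the keys
theorem keys_foldP : ∀ (L : List (List Char × Int)) (D : PySem.Dict (List Char) Int),
    (L.foldl (fun nxt yv => if nxt.contains yv.1 then nxt else nxt.insert yv.1 yv.2) D).keys
      = PySem.Set.update D.keys (L.map (fun yv => yv.1)) := by
  intro L
  induction L with
  | nil => intro D; simp [PySem.Set.update_nil]
  | cons yv L ih =>
    intro D
    rw [List.foldl_cons, ih, List.map_cons, PySem.Set.update_cons]
    congr 1
    by_cases h : D.contains yv.1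
    · rw [if_pos h, PySem.Set.add_of_mem ((PySem.Dict.contains_iff_mem_keys D yv.1).mp h)]
    · rw [if_neg h, PySem.Dict.keys_insert_of_not_contains D yv.2 (by simpa using h)]
      rw [PySem.Set.add, if_neg]
      intro hc
      exact h ((PySem.Dict.contains_iff_mem_keys D yv.1).mpr (by simpa using hc))

-- … and the values, when every inserted value is a function of its key
theorem getD_foldP (f : List Char → Int) :
    ∀ (L : List (List Char × Int)) (D : PySem.Dict (List Char) Int) (q : List Char),
    (∀ yv ∈ L, yv.2 = f yv.1) →
    (L.foldl (fun nxt yv => if nxt.contains yv.1 then nxt else nxt.insert yv.1 yv.2) D).getD q 0 =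
      if D.contains q = false ∧ q ∈ L.map (fun yv => yv.1) then f q else D.getD q 0 := by
  intro L
  induction L with
  | nil => intro D q _; simp
  | cons yv L ih =>
    intro D q hf
    have hyv : yv.2 = f yv.1 := hf yv (by simp)
    have hfL : ∀ z ∈ L, z.2 = f z.1 := fun z hz => hf z (by simp [hz])
    rw [List.foldl_cons]
    by_cases hp : D.contains yv.1
    · rw [if_pos hp, ih D q hfL]
      by_cases hq : D.contains q
      · simp [hq]
      · have hqp : q ≠ yv.1 := fun h => hq (h ▸ hp)
        have hmm : (q ∈ List.map (fun yv => yv.1) (yv :: L)) ↔ q ∈ List.map (fun yv => yv.1) L := by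
          simp [List.mem_cons, hqp]
        by_cases hcq : D.contains q = false
        · by_cases hm : q ∈ List.map (fun yv => yv.1) L
          · rw [if_pos ⟨hcq, hm⟩, if_pos ⟨hcq, hmm.mpr hm⟩]
          · rw [if_neg (fun h => hm h.2), if_neg (fun h => hm (hmm.mp h.2))]
        · rw [if_neg (fun h => hcq h.1), if_neg (fun h => hcq h.1)]
    · rw [if_neg hp, ih _ q hfL]
      by_cases h2 : q = yv.1
      · have hcq : (D.insert yv.1 yv.2).contains q = true := by
          rw [h2, PySem.Dict.contains_insert]; simp
        rw [if_neg (by simp [hcq]), PySem.Dict.getD_insert, if_pos h2, hyv, h2,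
            if_pos ⟨by simpa using hp, by simp⟩]
      · have hc : (D.insert yv.1 yv.2).contains q = D.contains q := by
          rw [PySem.Dict.contains_insert]; simp [h2]
        rw [hc, PySem.Dict.getD_insert, if_neg h2]
        have hmm : (q ∈ List.map (fun yv => yv.1) (yv :: L)) ↔ q ∈ List.map (fun yv => yv.1) L := by
          simp [List.mem_cons, h2]
        by_cases hcq : D.contains q = false
        · by_cases hm : q ∈ List.map (fun yv => yv.1) L
          · rw [if_pos ⟨hcq, hm⟩, if_pos ⟨hcq, hmm.mpr hm⟩]
          · rw [if_neg (fun h => hm h.2), if_neg (fun h => hm (hmm.mp h.2))]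
        · rw [if_neg (fun h => hcq h.1), if_neg (fun h => hcq h.1)]

-- one frontier level equals A's next neighbour set, annotated with Hamming distances
theorem extendLevel_eq (c : Char) (rest : List Char) (d : Int) (hd : d ≠ 0) (hr : rest ≠ []) :
    extendLevel d c ((NeighboursA rest d).map (fun x => (x, hamA rest x)))
      = (NeighboursA (c :: rest) d).map (fun y => (y, hamA (c :: rest) y)) := by
  unfold extendLevel
  have hinner : ∀ (nxt : PySem.Dict (List Char) Int) (xe : List Char × Int),
      (if xe.2 < d then
        nucsB.foldl
          (fun nxt n =>
            if nxt.contains (n :: xe.1) then nxt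
            else nxt.insert (n :: xe.1) (xe.2 + (if n = c then 0 else 1)))
          nxt
       else if nxt.contains (c :: xe.1) then nxt else nxt.insert (c :: xe.1) xe.2)
      = ((if xe.2 < d then nucsB.map (fun n => (n :: xe.1, xe.2 + (if n = c then 0 else 1)))
          else [(c :: xe.1, xe.2)]).foldl
          (fun nxt yv => if nxt.contains yv.1 then nxt else nxt.insert yv.1 yv.2) nxt) := by
    intro nxt xe
    by_cases hh : xe.2 < d
    · rw [if_pos hh, if_pos hh, List.foldl_map]
    · rw [if_neg hh, if_neg hh, List.foldl_cons, List.foldl_nil]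
  rw [PySem.List.foldl_congr_mem _ _ _ _ (fun nxt xe _ => hinner nxt xe), ← List.foldl_flatMap]
  set L := ((NeighboursA rest d).map (fun x => (x, hamA rest x))).flatMap
      (fun xe => if xe.2 < d then nucsB.map (fun n => (n :: xe.1, xe.2 + (if n = c then 0 else 1)))
                 else [(c :: xe.1, xe.2)]) with hL
  have hkeys : L.map (fun yv => yv.1)
      = (NeighboursA rest d).flatMap (fun x => (if hamA rest x < d then nucsB else [c]).map (fun n => n :: x)) := by
    rw [hL, List.map_flatMap, List.flatMap_map]
    apply List.flatMap_congr  -- pointwise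
    intro x hx
    split_ifs with hh
    · simp
    · simp
  have hval : ∀ yv ∈ L, yv.2 = hamA (c :: rest) yv.1 := by
    intro yv hyv
    rw [hL] at hyv
    simp only [List.mem_flatMap, List.mem_map] at hyv
    obtain ⟨xe, ⟨x, hx, rfl⟩, hmem⟩ := hyv
    have hlen : x.length = rest.length := neighboursA_length d rest x hx
    split_ifs at hmem with hh
    · simp only [List.mem_map] at hmem
      obtain ⟨n, hn, rfl⟩ := hmem
      rw [ham_eq, ham_eq, hamB_cons c n rest x hlen]
      ring
    · simp only [List.mem_singleton] at hmem
      subst hmem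
      show hamA rest x = hamA (c :: rest) (c :: x)
      rw [ham_eq, ham_eq, hamB_cons c c rest x hlen]
      simp
  have hnodup : (PySem.Set.ofList (L.map (fun yv => yv.1))).Nodup := PySem.Set.nodup_ofList _
  rw [PySem.Dict.items_eq_map_keys _ (by rw [keys_foldP, PySem.Dict.keys_empty, PySem.Set.update_nil_left]; exact hnodup) 0]
  rw [keys_foldP, PySem.Dict.keys_empty, PySem.Set.update_nil_left]
  rw [A_level c rest d hd hr, ← hkeys]
  apply List.map_congr_left
  intro q hq
  have hq' : q ∈ L.map (fun yv => yv.1) := (PySem.Set.mem_ofList _ q).mp hq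
  rw [getD_foldP (fun y => hamA (c :: rest) y) L PySem.Dict.empty q hval,
      if_pos ⟨by simp, hq'⟩]

-- the whole frontier loop: B's neighborhood equals A's Neighbours, annotated with distances
theorem frontier_eq (d : Int) (hd : d ≠ 0) :
    ∀ (p : List Char) (last : Char), p.getLast? = some last →
    (p.dropLast.reverse.foldl (fun f c => extendLevel d c f)
        (nucsB.map (fun ch => ([ch], if ch = last then (0 : Int) else 1))))
      = (NeighboursA p d).map (fun x => (x, hamA p x)) := by
  intro p
  induction p with
  | nil => intro last h; simp at h
  | cons c rest ih =>
    intro last hlast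
    by_cases hr : rest = []
    · subst hr
      have hc : c = last := by simpa using hlast
      subst hc
      simp only [show ([c] : List Char).dropLast = [] from rfl, List.reverse_nil, List.foldl_nil]
      rw [NeighboursA, if_neg hd, if_pos (by simp), nucsA_eq, List.map_map]
      apply List.map_congr_left
      intro n _
      simp [Function.comp, hamA_single]
    · obtain ⟨b, rest', rfl⟩ := List.exists_cons_of_ne_nil hr
      have hlast' : (b :: rest').getLast? = some last := by
        rw [← List.getLast?_cons_cons]; exact hlast
      rw [List.dropLast_cons₂, List.reverse_cons, List.foldl_append, List.foldl_cons,
          List.foldl_nil, ih last hlast', extendLevel_eq c (b :: rest') d hd (by simp)]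

theorem neighborhood_eq (p : List Char) (d : Int) (h : p ≠ [] ∨ d = 0) :
    neighborhoodB p d = NeighboursA p d := by
  by_cases hd : d = 0
  · subst hd
    rw [neighborhoodB.eq_def, NeighboursA.eq_def]
    simp [PySem.Set.add, PySem.Set.empty]
  · have hp : p ≠ [] := h.resolve_right hd
    obtain ⟨last, hlast⟩ := Option.isSome_iff_exists.mp (List.getLast?_isSome.mpr hp)
    rw [neighborhoodB.eq_def, if_neg hd, hlast]
    show (p.dropLast.reverse.foldl (fun f c => extendLevel d c f)
        (nucsB.map (fun ch => ([ch], if ch = last then (0 : Int) else 1)))).map (fun xe => xe.1)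
      = NeighboursA p d
    rw [frontier_eq d hd p last hlast, List.map_map,
        show ((fun xe : List Char × Int => xe.1) ∘ fun x => (x, hamA p x)) = id from rfl,
        List.map_id]

-- keys of A's insert fold and of B's insert-if-absent fold (value irrelevant)
theorem keys_foldG (v : List Char → Int) :
    ∀ (l : List (List Char)) (D : PySem.Dict (List Char) Int),
    (l.foldl (fun D p => if D.contains p then D
                         else D.insert p (v p)) D).keys = PySem.Set.update D.keys l := by
  intro l
  induction l with
  | nil => intro D; simp [PySem.Set.update_nil]
  | cons p l ih =>
    intro D
    rw [List.foldl_cons, ih, PySem.Set.update_cons]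
    congr 1
    by_cases h : D.contains p
    · rw [if_pos h, PySem.Set.add_of_mem ((PySem.Dict.contains_iff_mem_keys D p).mp h)]
    · rw [if_neg h, PySem.Dict.keys_insert_of_not_contains D (v p) (by simpa using h)]
      rw [PySem.Set.add, if_neg]
      intro hc
      exact h ((PySem.Dict.contains_iff_mem_keys D p).mpr (by simpa using hc))

theorem getD_fold_insert (v : List Char → Int) :
    ∀ (l : List (List Char)) (D : PySem.Dict (List Char) Int) (q : List Char),
    (l.foldl (fun D p => D.insert p (v p)) D).getD q 0 = if q ∈ l then v q else D.getD q 0 := by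
  intro l
  induction l with
  | nil => intro D q; simp
  | cons p l ih =>
    intro D q
    rw [List.foldl_cons, ih, PySem.Dict.getD_insert]
    by_cases h1 : q ∈ l
    · simp [h1]
    · by_cases h2 : q = p <;> simp [h1, h2]

theorem getD_foldG (v : List Char → Int) :
    ∀ (l : List (List Char)) (D : PySem.Dict (List Char) Int) (q : List Char),
    (l.foldl (fun D p => if D.contains p then D
                         else D.insert p (v p)) D).getD q 0 =
      if D.contains q = false ∧ q ∈ l then v q else D.getD q 0 := by
  intro l
  induction l with
  | nil => intro D q; simp
  | cons p l ih =>
    intro D q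
    rw [List.foldl_cons]
    by_cases hp : D.contains p
    · rw [if_pos hp, ih]
      by_cases hq : D.contains q
      · simp [hq]
      · have hqp : q ≠ p := fun h => hq (h ▸ hp)
        simp [hq, hqp, List.mem_cons]
    · rw [if_neg hp, ih]
      by_cases h2 : q = p
      · subst h2
        have hc : (D.insert q (v q)).contains q = true := by
          rw [PySem.Dict.contains_insert]; simp
        rw [if_neg (by simp [hc]), PySem.Dict.getD_insert, if_pos rfl,
            if_pos ⟨by simpa using hp, List.mem_cons_self⟩]
      · have hc : (D.insert p (v p)).contains q = D.contains q := by
          rw [PySem.Dict.contains_insert]; simp [h2]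
        rw [hc, PySem.Dict.getD_insert, if_neg h2]
        by_cases hq : D.contains q <;> simp [hq, h2, List.mem_cons]

-- phase-2 inner loop: crediting one distinct window w2 of multiplicity m to every matching pattern
theorem inner_credit (d : Int) (w2 : List Char) (m : Int) :
    ∀ (P : List (List Char)), P.Nodup →
    ∀ (D : PySem.Dict (List Char) Int), (∀ p ∈ P, D.contains p = true) →
    ((P.foldl (fun D p => if hamB p w2 ≤ d then D.insert p (D.getD p 0 + m) else D) D).keys = D.keys ∧
     ∀ q, (P.foldl (fun D p => if hamB p w2 ≤ d then D.insert p (D.getD p 0 + m) else D) D).getD q 0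
        = D.getD q 0 + (if q ∈ P ∧ hamB q w2 ≤ d then m else 0)) := by
  intro P
  induction P with
  | nil => intro _ D _; simp
  | cons p P ih =>
    intro hnd D hsub
    have hp : D.contains p = true := hsub p (by simp)
    have hndP : P.Nodup := (List.nodup_cons.mp hnd).2
    have hpP : p ∉ P := (List.nodup_cons.mp hnd).1
    rw [List.foldl_cons]
    by_cases hham : hamB p w2 ≤ d
    · rw [if_pos hham]
      have hkeys' : (D.insert p (D.getD p 0 + m)).keys = D.keys :=
        PySem.Dict.keys_insert_of_contains D (D.getD p 0 + m) hp
      have hsub' : ∀ q ∈ P, (D.insert p (D.getD p 0 + m)).contains q = true := by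
        intro q hq
        rw [PySem.Dict.contains_insert]
        simp [hsub q (by simp [hq])]
      obtain ⟨hk, hv⟩ := ih hndP _ hsub'
      refine ⟨by rw [hk, hkeys'], ?_⟩
      intro q
      rw [hv q, PySem.Dict.getD_insert]
      by_cases hqp : q = p
      · subst hqp
        rw [if_pos rfl, if_neg (fun hc => hpP hc.1), if_pos ⟨by simp, hham⟩]
        ring
      · rw [if_neg hqp]
        by_cases hqP : q ∈ P <;> simp [hqP, hqp, List.mem_cons]
    · rw [if_neg hham]
      obtain ⟨hk, hv⟩ := ih hndP D (fun q hq => hsub q (List.mem_cons_of_mem _ hq))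
      refine ⟨hk, ?_⟩
      intro q
      rw [hv q]
      by_cases hqp : q = p
      · subst hqp
        rw [if_neg (fun hc => hpP hc.1), if_neg (fun hc => hham hc.2)]
      · by_cases hqP : q ∈ P <;> simp [hqP, hqp, List.mem_cons]

-- phase-2 outer loop: the accumulated credit is the filtered multiplicity sum
theorem credit_all (d : Int) (P : List (List Char)) (hnd : P.Nodup) :
    ∀ (L : List (List Char × Int)) (D : PySem.Dict (List Char) Int),
    (∀ p ∈ P, D.contains p = true) →
    ((L.foldl (fun D wm => P.foldl
        (fun D p => if hamB p wm.1 ≤ d then D.insert p (D.getD p 0 + wm.2) else D) D) D).keys = D.keys ∧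
     ∀ q, (L.foldl (fun D wm => P.foldl
        (fun D p => if hamB p wm.1 ≤ d then D.insert p (D.getD p 0 + wm.2) else D) D) D).getD q 0
       = D.getD q 0 + (if q ∈ P then ((L.filter (fun wm => hamB q wm.1 ≤ d)).map (fun wm => wm.2)).sum else 0)) := by
  intro L
  induction L with
  | nil => intro D _; simp
  | cons wm L ih =>
    intro D hsub
    rw [List.foldl_cons]
    obtain ⟨hk1, hv1⟩ := inner_credit d wm.1 wm.2 P hnd D hsub
    have hsub' : ∀ p ∈ P, (P.foldl (fun D p => if hamB p wm.1 ≤ d then D.insert p (D.getD p 0 + wm.2) else D) D).contains p = true := by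
      intro p hp
      rw [PySem.Dict.contains_iff_mem_keys, hk1, ← PySem.Dict.contains_iff_mem_keys]
      exact hsub p hp
    obtain ⟨hk2, hv2⟩ := ih _ hsub'
    refine ⟨by rw [hk2, hk1], ?_⟩
    intro q
    rw [hv2 q, hv1 q]
    by_cases hqP : q ∈ P
    · simp only [hqP, true_and]
      rw [List.filter_cons]
      by_cases hham : hamB q wm.1 ≤ d
      · simp [hham]; ring
      · simp [hham]
    · simp [hqP]

-- every distinct-window multiplicity sum equals A's text rescan count
theorem cnt_sum (P : List Char → Bool) (xs : List (List Char)) :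
    ((((PySem.Set.ofList xs).filter P).map (fun w => (List.count w xs : Int))).sum)
      = (xs.countP P : Int) := by
  induction xs using List.reverseRecOn with
  | nil => simp [PySem.Set.ofList]
  | append_singleton xs x ih =>
    rw [PySem.Set.ofList_append_singleton, List.countP_append]
    by_cases hx : x ∈ xs
    · rw [PySem.Set.add_of_mem (by rwa [PySem.Set.mem_ofList])]
      have hsplit : ∀ w : List Char, (List.count w (xs ++ [x]) : Int)
          = (List.count w xs : Int) + (if w = x then (1:Int) else 0) := by
        intro w
        rw [List.count_append, List.count_singleton]
        by_cases h : w = x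
        · subst h; simp
        · simp [h, Ne.symm h]
      calc ((((PySem.Set.ofList xs).filter P).map (fun w => (List.count w (xs ++ [x]) : Int))).sum)
          = ((((PySem.Set.ofList xs).filter P).map
              (fun w => (List.count w xs : Int) + (if w = x then (1:Int) else 0))).sum) := by
            exact congrArg _ (List.map_congr_left (fun w _ => hsplit w))
        _ = ((((PySem.Set.ofList xs).filter P).map (fun w => (List.count w xs : Int))).sum)
            + ((((PySem.Set.ofList xs).filter P).map (fun w => if w = x then (1:Int) else 0)).sum) := by
            rw [PySem.List.sum_map_add_int]
        _ = (xs.countP P : Int) + ([x].countP P : Int) := by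
            rw [ih]
            congr 1
            have h1 : (((PySem.Set.ofList xs).filter P).map (fun w => if w = x then (1:Int) else 0)).sum
                = (((PySem.Set.ofList xs).filter P).countP (fun w => w == x) : Int) := by
              rw [← PySem.List.sum_map_ite_one_zero (fun w => w == x)]
              simp
            rw [h1]
            by_cases hP : P x
            · have hmem : x ∈ (PySem.Set.ofList xs).filter P := by
                rw [List.mem_filter]
                exact ⟨(PySem.Set.mem_ofList xs x).mpr hx, hP⟩
              rw [show List.countP (fun w => w == x) ((PySem.Set.ofList xs).filter P)
                    = List.count x ((PySem.Set.ofList xs).filter P) from rfl]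
              rw [List.count_eq_one_of_mem ((PySem.Set.nodup_ofList xs).filter P) hmem]
              simp [hP]
            · have hmem : ¬ x ∈ (PySem.Set.ofList xs).filter P := by
                rw [List.mem_filter]; simp [hP]
              rw [show List.countP (fun w => w == x) ((PySem.Set.ofList xs).filter P)
                    = List.count x ((PySem.Set.ofList xs).filter P) from rfl]
              rw [List.count_eq_zero.mpr hmem]
              simp [hP]
    · rw [PySem.Set.add_of_not_mem (by rwa [PySem.Set.mem_ofList]), List.filter_append,
          List.map_append, List.sum_append]
      have h1 : (((PySem.Set.ofList xs).filter P).map (fun w => (List.count w (xs ++ [x]) : Int))).sum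
          = (((PySem.Set.ofList xs).filter P).map (fun w => (List.count w xs : Int))).sum := by
        apply congrArg
        apply List.map_congr_left
        intro w hw
        have hwx : w ≠ x := by
          intro h; subst h
          exact hx ((PySem.Set.mem_ofList xs w).mp (List.mem_filter.mp hw).1)
        rw [List.count_append, List.count_singleton, if_neg (by simpa using fun h => hwx h.symm)]
        simp
      rw [h1, ih]
      by_cases hP : P x
      · simp [hP, List.count_append, List.count_eq_zero.mpr hx]
      · simp [hP]

theorem win_len (t : List Char) (k : Int) (hk : 0 ≤ k) (i : Int)
    (hi : i ∈ PySem.List.pyRange 0 ((t.length : Int) - k + 1) 1) :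
    (PySem.List.slice t (some i) (some (i + k))).length = k.toNat := by
  rw [PySem.List.mem_pyRange_one] at hi
  obtain ⟨h0, h1⟩ := hi
  rw [show some i = some ((i.toNat : Nat) : Int) by rw [Int.toNat_of_nonneg h0],
      show some (i + k) = some (((i.toNat + k.toNat : Nat)) : Int) by rw [show i + k = (((i.toNat + k.toNat : Nat)) : Int) by push_cast; omega],
      PySem.List.slice_natCast]
  simp only [List.length_take, List.length_drop]
  omega

theorem val_eq (t : List Char) (k d : Int) (hk : 0 ≤ k) (q : List Char) (hq : q.length = k.toNat) :
    apcA t q d =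
      (((((PySem.List.pyRange 0 ((t.length : Int) - k + 1) 1).map
            (fun i => PySem.List.slice t (some i) (some (i + k)))).foldl
          (fun D w => D.insert w (D.getD w 0 + 1)) PySem.Dict.empty).items.filter
            (fun pr => hamB q pr.1 ≤ d)).map (fun pr => pr.2)).sum := by
  set W := (PySem.List.pyRange 0 ((t.length : Int) - k + 1) 1).map
      (fun i => PySem.List.slice t (some i) (some (i + k))) with hW
  rw [PySem.Dict.foldl_insert_getD_add_one_eq_counter, PySem.Dict.items_counter,
      List.filter_map, List.map_map]
  have hcomp : ((fun pr : List Char × Int => decide (hamB q pr.1 ≤ d)) ∘ fun w => (w, (List.count w W : Int)))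
      = (fun w => decide (hamB q w ≤ d)) := rfl
  have hcomp2 : ((fun pr : List Char × Int => pr.2) ∘ fun w => (w, (List.count w W : Int)))
      = (fun w => (List.count w W : Int)) := rfl
  rw [hcomp, hcomp2, cnt_sum]
  unfold apcA kmerA
  rw [show ((q.length : Nat) : Int) = k by rw [hq]; exact Int.toNat_of_nonneg hk]
  have hfun : (fun (count : Int) (i : Int) =>
        if hamA q (PySem.List.slice t (some i) (some (i + k))) ≤ d then count + 1 else count)
      = (fun count i => if (decide (hamA q (PySem.List.slice t (some i) (some (i + k))) ≤ d)) = true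
          then count + 1 else count) := by
    funext c i; simp
  rw [hfun, PySem.List.foldl_count_if]
  rw [hW, List.countP_map]
  have : (fun i => decide (hamA q (PySem.List.slice t (some i) (some (i + k))) ≤ d))
      = ((fun w => decide (hamB q w ≤ d)) ∘ fun i => PySem.List.slice t (some i) (some (i + k))) := by
    funext i; simp [Function.comp, ham_eq]
  rw [this]
  simp

-- ===== VERDICT (by name: the statement is the Claim_ definition above) =====
theorem kmerswithapproxcount_spec : Claim_equal_kmerswithapproxcount := by
  intro text k d _ hpre
  obtain ⟨hk, hk0⟩ := hpre
  unfold Spec_kmerswithapproxcount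
  simp only [kmerswithapproxcount, kmerswithapproxcount_alt]
  set t := text.toList with ht
  set W := (PySem.List.pyRange 0 ((t.length : Int) - k + 1) 1).map
      (fun i => PySem.List.slice t (some i) (some (i + k))) with hW
  have hwin : LwindowsA t k = W := by
    unfold LwindowsA kmerA
    rw [PySem.List.foldl_append_singleton_eq_map]
    simp [hW]
  rw [hwin]
  -- every window is nonempty unless d = 0
  have hwne : ∀ w ∈ W, w ≠ [] ∨ d = 0 := by
    intro w hwW
    by_cases hd : d = 0
    · exact Or.inr hd
    · left
      obtain ⟨i, hi, rfl⟩ := List.mem_map.mp (hW ▸ hwW)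
      have hkpos : 0 < k := lt_of_le_of_ne hk (fun h => hd (hk0 h.symm))
      have : (PySem.List.slice t (some i) (some (i + k))).length = k.toNat := win_len t k hk i hi
      intro hnil
      rw [hnil] at this
      simp at this
      omega
  -- B's neighborhood list is A's Neighbours set on every window
  have hnbr : (W.foldl
      (fun D w => (neighborhoodB w d).foldl
        (fun D p => if D.contains p then D else D.insert p (0 : Int)) D)
      (PySem.Dict.empty : PySem.Dict (List Char) Int))
      = (W.foldl
      (fun D w => (NeighboursA w d).foldl
        (fun D p => if D.contains p then D else D.insert p (0 : Int)) D)
      (PySem.Dict.empty : PySem.Dict (List Char) Int)) := by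
    exact PySem.List.foldl_congr_mem _ _ _ _ (fun D w hwW => by rw [neighborhood_eq w d (hwne w hwW)])
  simp only [hnbr]
  set seq := W.flatMap (fun w => NeighboursA w d) with hseq
  have hA : (W.foldl (fun D w => (NeighboursA w d).foldl (fun D p => D.insert p (apcA t p d)) D)
        PySem.Dict.empty)
      = seq.foldl (fun D p => D.insert p (apcA t p d)) PySem.Dict.empty := by
    rw [hseq, List.foldl_flatMap]
  have hB0 : (W.foldl
      (fun D w => (NeighboursA w d).foldl
        (fun D p => if D.contains p then D else D.insert p (0 : Int)) D)
      (PySem.Dict.empty : PySem.Dict (List Char) Int))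
      = seq.foldl (fun D p => if D.contains p then D else D.insert p ((fun _ => (0:Int)) p)) PySem.Dict.empty := by
    rw [hseq, List.foldl_flatMap]
  rw [hA, hB0]
  set counts0 := seq.foldl (fun D p => if D.contains p then D else D.insert p ((fun _ => (0:Int)) p)) PySem.Dict.empty with hc0
  have hkB : counts0.keys = PySem.Set.ofList seq := by
    rw [hc0, keys_foldG (fun _ => (0:Int)) seq PySem.Dict.empty]
    simp [PySem.Set.update_nil_left]
  have hndseq : (PySem.Set.ofList seq).Nodup := PySem.Set.nodup_ofList seq
  have hsub : ∀ p ∈ counts0.keys, counts0.contains p = true := by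
    intro p hp
    exact (PySem.Dict.contains_iff_mem_keys counts0 p).mpr hp
  obtain ⟨hkfin, hvfin⟩ := credit_all d counts0.keys (by rw [hkB]; exact hndseq)
      (W.foldl (fun D w => D.insert w (D.getD w 0 + 1)) PySem.Dict.empty).items counts0 hsub
  rw [hkB] at hkfin hvfin
  -- A's final dict
  set DA := seq.foldl (fun D p => D.insert p (apcA t p d)) PySem.Dict.empty with hDA
  have hkA : DA.keys = PySem.Set.ofList seq := by
    rw [hDA, PySem.Dict.keys_foldl_insert seq (fun D p => apcA t p d) PySem.Dict.empty]
    simp [PySem.Set.update_nil_left]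
  apply congrArg
  rw [hkB]
  rw [PySem.Dict.items_eq_map_keys DA (by rw [hkA]; exact hndseq) 0,
      PySem.Dict.items_eq_map_keys _ (by rw [hkfin]; exact hndseq) 0,
      hkfin, hkA]
  apply List.map_congr_left
  intro q hq
  have hqseq : q ∈ seq := (PySem.Set.mem_ofList seq q).mp hq
  obtain ⟨w, hwW, hqw⟩ := List.mem_flatMap.mp hqseq
  obtain ⟨i, hi, rfl⟩ := List.mem_map.mp (hW ▸ hwW)
  have hlen : q.length = k.toNat := by
    rw [neighboursA_length d _ q hqw]
    exact win_len t k hk i hi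
  have hvA : DA.getD q 0 = apcA t q d := by
    rw [hDA, getD_fold_insert (fun p => apcA t p d) seq PySem.Dict.empty q, if_pos hqseq]
  have hvB : counts0.getD q 0 = 0 := by
    rw [hc0, getD_foldG (fun _ => (0:Int)) seq PySem.Dict.empty q, if_pos ⟨by simp, hqseq⟩]
  rw [hvfin q, hvB, hvA, if_pos hq]
  have := val_eq t k d hk q hlen
  rw [← hW] at this
  rw [this]
  simp [hW]
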